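-- pv_equiv track=rewrite | github.com/pkrayzel/cermat-scraper | quiz.py | format_answered
-- ===== SOURCE A (Python) =====
-- def format_answered(questions):
--     """ Convert a set of numbers into a mix of `range()` and single numbers. """
--     sorted_questions = sorted(questions)
--     if not sorted_questions:
--         return "[]"
--
--     ranges = []
--     current_range = [sorted_questions[0]]
--
--     for num in sorted_questions[1:]:
--         if num == current_range[-1] + 1:
--             current_range.append(num)
--         else:
--             if len(current_range) > 1:
--                 ranges.append(f"range({current_range[0]}, {current_range[-1] + 1})")
--             else:
--                 ranges.append(str(current_range[0]))
--             current_range = [num]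
--
--     if len(current_range) > 1:
--         ranges.append(f"range({current_range[0]}, {current_range[-1] + 1})")
--     else:
--         ranges.append(str(current_range[0]))
--
--     return "[" + ", ".join(ranges) + "]"
-- ===== SOURCE B (Python) =====
-- def format_answered(questions):
--     """ Convert a set of numbers into a mix of `range()` and single numbers. """
--     xs = sorted(questions)
--     n = len(xs)
--     parts = []
--     i = 0
--     while i < n:
--         j = i + 1
--         while j < n and xs[j] == xs[j - 1] + 1:
--             j += 1
--         if j == i + 1:
--             parts.append(str(xs[i]))
--         else:
--             parts.append(f"range({xs[i]}, {xs[j - 1] + 1})")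
--         i = j
--     return "[" + ", ".join(parts) + "]"
-- ===== Notes on version B (the rewrite author's own statement) =====
-- stated objective: alternative
-- what changed: Replaces A's single pass with a mutable current_range accumulator and a post-loop flush by a two-pointer scan: an inner loop advances j to the end of each maximal consecutive run and emits the piece directly from xs[i] and xs[j-1], with no run accumulator, no trailing flush, and no empty special case.
import Mathlib
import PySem

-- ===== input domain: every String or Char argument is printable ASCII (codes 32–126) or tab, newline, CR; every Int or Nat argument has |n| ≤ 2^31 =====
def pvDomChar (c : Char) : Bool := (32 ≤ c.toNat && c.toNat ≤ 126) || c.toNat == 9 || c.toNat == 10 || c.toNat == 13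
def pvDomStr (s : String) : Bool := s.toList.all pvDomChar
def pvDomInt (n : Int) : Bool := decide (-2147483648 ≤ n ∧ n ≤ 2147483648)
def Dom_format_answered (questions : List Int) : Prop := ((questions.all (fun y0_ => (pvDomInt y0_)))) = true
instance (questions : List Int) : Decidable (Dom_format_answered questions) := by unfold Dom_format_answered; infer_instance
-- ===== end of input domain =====

-- B replaces A's single pass with a current_range accumulator and post-loop flush by a
-- two-pointer scan that finds the end of each maximal consecutive run and emits the piece
-- directly from its endpoints (objective: alternative decomposition, not faster).

-- ===== PORT A =====
-- current_range is kept in REVERSE order: head = current_range[-1], getLastD = current_range[0].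
def emitA (cur : List Int) : String :=
  if cur.length > 1 then
    "range(" ++ PySem.Int.toStr (cur.getLastD 0) ++ ", " ++ PySem.Int.toStr (cur.headD 0 + 1) ++ ")"
  else
    PySem.Int.toStr (cur.getLastD 0)

def stepA (s : List String × List Int) (num : Int) : List String × List Int :=
  if num == s.2.headD 0 + 1 then (s.1, num :: s.2)
  else (s.1 ++ [emitA s.2], [num])

def format_answered (questions : List Int) : String :=
  match PySem.List.sorted questions (fun x => x) false with
  | [] => "[]"
  | h :: t =>
    let s := t.foldl stepA ([], [h])
    "[" ++ PySem.Str.join ", " (s.1 ++ [emitA s.2]) ++ "]"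

-- ===== PORT B =====
-- grabB prev rest: the inner `while` loop — extend the run while the next element is prev+1;
-- returns (last element of the run, remaining list).
def grabB (prev : Int) : List Int → Int × List Int
  | [] => (prev, [])
  | y :: ys => if y == prev + 1 then grabB y ys else (prev, y :: ys)

theorem grabB_snd_length_le (prev : Int) (l : List Int) : (grabB prev l).2.length ≤ l.length := by
  induction l generalizing prev with
  | nil => simp [grabB]
  | cons y ys ih =>
    simp only [grabB]
    split
    · exact le_trans (ih y) (Nat.le_succ _)
    · simp

def pieceB (first lastv : Int) : String :=
  if lastv == first then PySem.Int.toStr first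
  else "range(" ++ PySem.Int.toStr first ++ ", " ++ PySem.Int.toStr (lastv + 1) ++ ")"

-- the outer `while` loop: one piece per maximal run
def runsB : List Int → List String
  | [] => []
  | x :: rest =>
    let p := grabB x rest
    pieceB x p.1 :: runsB p.2
termination_by l => l.length
decreasing_by
  exact Nat.lt_succ_of_le (grabB_snd_length_le x rest)

def format_answered_alt (questions : List Int) : String :=
  "[" ++ PySem.Str.join ", " (runsB (PySem.List.sorted questions (fun x => x) false)) ++ "]"

-- ===== PRECONDITION & SPEC =====
def Spec_format_answered (questions : List Int) (out : String) : Prop := out = format_answered_alt questions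
instance (questions : List Int) (out : String) : Decidable (Spec_format_answered questions out) := by unfold Spec_format_answered; infer_instance

-- ===== CLAIM (what is proved, stated in full; the proofs are below) =====
def Claim_equal_format_answered : Prop := ∀ (questions : List Int), Dom_format_answered questions → Spec_format_answered questions (format_answered questions)

-- ===== LEMMAS AND PROOFS =====

-- the run A's current_range holds, in A's reversed representation: [f+k, f+k-1, …, f]
def descRun (f : Int) : Nat → List Int
  | 0 => [f]
  | k + 1 => (f + (k + 1 : Nat)) :: descRun f k

theorem descRun_ne_nil (f : Int) (k : Nat) : descRun f k ≠ [] := by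
  cases k <;> simp [descRun]

theorem descRun_head (f : Int) (k : Nat) : (descRun f k).head?.getD 0 = f + k := by
  cases k <;> simp [descRun]

theorem descRun_last (f : Int) (k : Nat) : (descRun f k).getLast?.getD 0 = f := by
  induction k with
  | zero => simp [descRun]
  | succ k ih =>
    cases hd : descRun f k with
    | nil => exact absurd hd (descRun_ne_nil f k)
    | cons c cs =>
      rw [hd] at ih
      simpa [descRun, hd, List.getLast?_cons_cons] using ih

theorem descRun_length (f : Int) (k : Nat) : (descRun f k).length = k + 1 := by
  induction k with
  | zero => simp [descRun]
  | succ k ih => simp [descRun, ih]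

theorem emitA_descRun (f : Int) (k : Nat) : emitA (descRun f k) = pieceB f (f + k) := by
  cases k with
  | zero => simp [emitA, pieceB, descRun]
  | succ k =>
    have h1 : 1 < (descRun f (k + 1)).length := by rw [descRun_length]; omega
    have h2 : ¬ ((f : Int) + ((k + 1 : Nat) : Int) = f) := by push_cast; omega
    simp [emitA, pieceB, h1, descRun_head, descRun_last]
    intro hk
    exfalso; omega

theorem main_loop (t : List Int) : ∀ (acc : List String) (f : Int) (k : Nat),
    (t.foldl stepA (acc, descRun f k)).1 ++ [emitA (t.foldl stepA (acc, descRun f k)).2]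
      = acc ++ pieceB f (grabB (f + k) t).1 :: runsB (grabB (f + k) t).2 := by
  induction t with
  | nil =>
    intro acc f k
    simp [grabB, runsB, emitA_descRun]
  | cons num t' ih =>
    intro acc f k
    by_cases h : num = f + k + 1
    · have hnum : num = f + ((k + 1 : Nat) : Int) := by push_cast; omega
      have hstep : stepA (acc, descRun f k) num = (acc, descRun f (k + 1)) := by
        simp [stepA, descRun_head, h, descRun]
        omega
      have hgrab : grabB (f + k) (num :: t') = grabB (f + ((k + 1 : Nat) : Int)) t' := by
        rw [grabB]
        simp [h]
        congr 1
        ring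
      rw [List.foldl_cons, hstep, hgrab, ih acc f (k + 1)]
    · have hstep : stepA (acc, descRun f k) num
          = (acc ++ [emitA (descRun f k)], descRun num 0) := by
        simp [stepA, descRun_head, h, descRun]
      have hgrab : grabB (f + k) (num :: t') = (f + k, num :: t') := by
        rw [grabB]; simp [h]
      rw [List.foldl_cons, hstep, ih (acc ++ [emitA (descRun f k)]) num 0, hgrab]
      have hrB : runsB (num :: t')
          = pieceB num (grabB num t').1 :: runsB (grabB num t').2 := by
        rw [runsB]
      have h0 : num + ((0 : Nat) : Int) = num := by simp
      rw [h0, emitA_descRun]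
      simp [hrB]

-- ===== VERDICT (by name: the statement is the Claim_ definition above) =====
theorem format_answered_spec : Claim_equal_format_answered := by
  intro questions _
  unfold Spec_format_answered format_answered format_answered_alt
  cases hs : PySem.List.sorted questions (fun x => x) false with
  | nil => simp [runsB, PySem.Str.join]
  | cons h t =>
    dsimp only
    have hm := main_loop t [] h 0
    simp only [descRun, List.nil_append] at hm
    rw [hm]
    have h0 : h + ((0 : Nat) : Int) = h := by simp
    rw [h0]
    conv_rhs => rw [runsB]
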